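-- pv_equiv track=rewrite | github.com/KKKKSHI30/Leetcode | OA/Extraordinary Substring.py | countStrings
-- ===== SOURCE A (Python) =====
-- def countStrings(input_str):
--     num = 0
--     numset = []
--     for s in input_str:
--         numset.append(letter2num(s))
--     for i in range(len(numset)):
--         j = i
--         while j < len(numset):
--             if sum(numset[i:j+1]) % (j-i+1) == 0:
--                 num += 1
--             j += 1
--     return num
--
-- def letter2num(letter):
--     return (ord(letter) - ord('a') + 4) //3
-- ===== SOURCE B (Python) =====
-- def countStrings(input_str):
--     # prefix sums instead of re-summing each slice: O(n^2) instead of O(n^3)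
--     prefix = [0]
--     total = 0
--     for c in input_str:
--         total += (ord(c) - ord('a') + 4) // 3
--         prefix.append(total)
--     n = len(input_str)
--     count = 0
--     for i in range(n):
--         for j in range(i + 1, n + 1):
--             if (prefix[j] - prefix[i]) % (j - i) == 0:
--                 count += 1
--     return count
-- ===== Notes on version B (the rewrite author's own statement) =====
-- stated objective: faster
-- what changed: B builds a prefix-sum array once and tests each substring via prefix[j]-prefix[i], instead of A's re-summing every slice with sum(numset[i:j+1]).
import Mathlib
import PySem

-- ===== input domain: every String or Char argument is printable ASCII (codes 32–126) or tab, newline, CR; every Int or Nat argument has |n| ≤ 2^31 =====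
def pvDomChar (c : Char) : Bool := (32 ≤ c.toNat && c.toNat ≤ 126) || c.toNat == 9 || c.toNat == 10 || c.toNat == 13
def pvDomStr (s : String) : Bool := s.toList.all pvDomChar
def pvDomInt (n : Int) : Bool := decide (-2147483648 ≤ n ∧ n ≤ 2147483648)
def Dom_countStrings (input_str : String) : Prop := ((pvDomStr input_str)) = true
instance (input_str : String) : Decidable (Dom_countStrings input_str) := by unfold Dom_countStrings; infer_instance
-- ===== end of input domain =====

-- B replaces A's per-substring re-summation by a prefix-sum array: O(n^2) instead of O(n^3); same return value.

-- ===== PORT A =====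
def letter2num (letter : Char) : Int :=
  PySem.Int.floordiv ((letter.toNat : Int) - ('a'.toNat : Int) + 4) 3

-- the 'while j < len(numset)' loop of A, carried state (j, num)
def aWhile (numset : List Int) (i j : Nat) (num : Int) : Int :=
  if _h : j < numset.length then
    aWhile numset i (j + 1)
      (if PySem.Int.mod (PySem.List.slice numset (some (i : Int)) (some ((j : Int) + 1))).sum
           ((j : Int) - (i : Int) + 1) = 0 then num + 1 else num)
  else num
termination_by numset.length - j

def countStrings (input_str : String) : Int :=
  let numset := input_str.toList.foldl (fun acc s => acc ++ [letter2num s]) []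
  (List.range numset.length).foldl (fun num i => aWhile numset i i num) 0

-- ===== PORT B =====
def countStrings_alt (input_str : String) : Int :=
  -- prefix[k] = sum of the first k letter values
  let st := input_str.toList.foldl
    (fun (st : List Int × Int) c =>
      let total := st.2 + PySem.Int.floordiv ((c.toNat : Int) - ('a'.toNat : Int) + 4) 3
      (st.1 ++ [total], total)) ([0], 0)
  let pre := st.1
  let n := input_str.toList.length
  (List.range n).foldl (fun count i =>
    (List.range' (i + 1) (n - i)).foldl (fun count j =>
      -- prefix[j], prefix[i]: indices are always in range here
      if PySem.Int.mod (pre.getD j 0 - pre.getD i 0) ((j : Int) - (i : Int)) = 0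
      then count + 1 else count) count) 0

-- ===== PRECONDITION & SPEC =====
def Spec_countStrings (input_str : String) (out : Int) : Prop := out = countStrings_alt input_str
instance (input_str : String) (out : Int) : Decidable (Spec_countStrings input_str out) := by unfold Spec_countStrings; infer_instance

-- ===== CLAIM (what is proved, stated in full; the proofs are below) =====
def Claim_equal_countStrings : Prop := ∀ (input_str : String), Dom_countStrings input_str → Spec_countStrings input_str (countStrings input_str)

-- ===== LEMMAS AND PROOFS =====

-- P l k = sum of the first k mapped values
def pvP (l : List Char) (k : Nat) : Int := ((l.map letter2num).take k).sum

theorem pv_numset (l : List Char) (acc : List Int) :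
    l.foldl (fun acc s => acc ++ [letter2num s]) acc = acc ++ l.map letter2num := by
  induction l generalizing acc with
  | nil => simp
  | cons c l ih => simp [ih]

theorem pv_prefix_gen (l : List Char) (p : List Int) (t : Int) :
    (l.foldl (fun (st : List Int × Int) c =>
      let total := st.2 + PySem.Int.floordiv ((c.toNat : Int) - ('a'.toNat : Int) + 4) 3
      (st.1 ++ [total], total)) (p, t)).1
    = p ++ (List.range l.length).map (fun k => t + ((l.map letter2num).take (k + 1)).sum) := by
  induction l generalizing p t with
  | nil => simp
  | cons c l ih =>
    simp only [List.foldl_cons, ih, List.length_cons, List.range_succ_eq_map]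
    simp [letter2num, List.append_assoc, Function.comp, add_assoc]

theorem pv_prefix (l : List Char) :
    (l.foldl (fun (st : List Int × Int) c =>
      let total := st.2 + PySem.Int.floordiv ((c.toNat : Int) - ('a'.toNat : Int) + 4) 3
      (st.1 ++ [total], total)) ([0], 0)).1
    = (List.range (l.length + 1)).map (pvP l) := by
  rw [pv_prefix_gen, List.range_succ_eq_map]
  simp [pvP, Function.comp]

theorem pv_prefix_getD (l : List Char) (k : Nat) (hk : k ≤ l.length) :
    ((List.range (l.length + 1)).map (pvP l)).getD k 0 = pvP l k := by
  rw [List.getD_eq_getElem?_getD, List.getElem?_map]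
  rw [List.getElem?_range (by omega)]
  rfl

theorem pv_slice_sum (l : List Char) (i j : Nat) (hij : i ≤ j) (hj : j < l.length) :
    (PySem.List.slice (l.map letter2num) (some (i : Int)) (some ((j : Int) + 1))).sum
    = pvP l (j + 1) - pvP l i := by
  have h1 : ((j : Int) + 1) = ((j + 1 : Nat) : Int) := by push_cast; ring
  rw [h1, PySem.List.slice_natCast]
  have h2 : j + 1 = i + (j + 1 - i) := by omega
  have h3 : (l.map letter2num).take (j + 1)
      = (l.map letter2num).take i ++ ((l.map letter2num).drop i).take (j + 1 - i) := by
    rw [h2, List.take_add]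
    have h4 : i + (j + 1 - i) - i = j + 1 - i := by omega
    rw [h4]
  unfold pvP
  rw [h3, List.sum_append]
  ring

-- the inner loops agree: A's while from j equals B's fold over range' (j+1) (n-j)
theorem pv_inner (l : List Char) (i j : Nat) (num : Int) (hij : i ≤ j) :
    aWhile (l.map letter2num) i j num
    = (List.range' (j + 1) (l.length - j)).foldl (fun count j' =>
        if PySem.Int.mod (pvP l j' - pvP l i) ((j' : Int) - (i : Int)) = 0
        then count + 1 else count) num := by
  by_cases h : j < l.length
  · have hlen : (l.map letter2num).length = l.length := by simp
    rw [aWhile]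
    have hr : l.length - j = (l.length - (j + 1)) + 1 := by omega
    rw [hr, List.range'_succ, List.foldl_cons]
    rw [pv_inner l i (j + 1) _ (by omega)]
    have hcond : (PySem.Int.mod (PySem.List.slice (l.map letter2num) (some (i : Int)) (some ((j : Int) + 1))).sum
        ((j : Int) - (i : Int) + 1) = 0)
        = (PySem.Int.mod (pvP l (j + 1) - pvP l i) (((j + 1 : Nat) : Int) - (i : Int)) = 0) := by
      rw [pv_slice_sum l i j hij h]
      congr 1
      push_cast; ring
    simp only [hlen, hcond]
    rw [dif_pos h]
  · have hlen : (l.map letter2num).length = l.length := by simp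
    rw [aWhile]
    have hr : l.length - j = 0 := by omega
    simp [hlen, h, hr]
termination_by l.length - j

theorem countStrings_eq (input_str : String) :
    countStrings input_str = countStrings_alt input_str := by
  unfold countStrings countStrings_alt
  simp only [pv_numset, List.nil_append, pv_prefix]
  set l := input_str.toList with hl
  have hlen : (l.map letter2num).length = l.length := by simp
  rw [hlen]
  apply PySem.List.foldl_congr_mem
  intro num i hi
  have hi' : i < l.length := by
    simp only [List.mem_range] at hi; exact hi
  rw [pv_inner l i i num (le_refl i)]
  apply PySem.List.foldl_congr_mem
  intro count j hj
  have hjr : i + 1 ≤ j ∧ j < l.length + 1 := by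
    rw [List.mem_range'] at hj
    obtain ⟨k, hk1, hk2⟩ := hj; omega
  rw [pv_prefix_getD l j (by omega), pv_prefix_getD l i (by omega)]

-- ===== VERDICT (by name: the statement is the Claim_ definition above) =====
theorem countStrings_spec : Claim_equal_countStrings := by
  intro input_str _
  unfold Spec_countStrings
  exact countStrings_eq input_str
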